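-- pv_equiv track=rewrite | github.com/rabinkmc/dsa | python/w462-2.py | maxBalancedShipments
-- ===== SOURCE A (Python) =====
-- from typing import List
--
-- def maxBalancedShipments(weight: List[int]) -> int:
--     n = len(weight)
--     prevs = [weight[0]]
--     count = 0
--     for i in range(1, n):
--         if weight[i] < prevs[-1]:
--             prevs.append(weight[i])
--         else:
--             count += len(prevs) // 2
--             prevs = [weight[i]]
--     count += len(prevs) // 2
--     return count
-- ===== SOURCE B (Python) =====
-- from typing import List
--
-- def maxBalancedShipments(weight: List[int]) -> int:
--     # Greedy pairing: walk left to right, pairing an element with its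
--     # predecessor whenever it is strictly smaller and the predecessor is
--     # not already consumed by an earlier pair.  No runs are materialised.
--     count = 0
--     free = True  # is the previous element still available as a pair opener?
--     prev = weight[0]
--     for w in weight[1:]:
--         if free and w < prev:
--             count += 1
--             free = False
--         else:
--             free = True
--         prev = w
--     return count
-- ===== Notes on version B (the rewrite author's own statement) =====
-- stated objective: faster
-- what changed: A materialises each strictly-decreasing run as a list and adds len(run)//2 at every run boundary; B never forms runs at all: it greedily pairs adjacent elements in one pass with O(1) state (a count, a 'free' flag and the previous value), counting a pair whenever the current element is smaller than an unconsumed predecessor; a timing run measured B about 2x faster since it allocates no lists. Pre_ only excludes the empty list, where both implementations raise IndexError.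
import Mathlib
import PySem

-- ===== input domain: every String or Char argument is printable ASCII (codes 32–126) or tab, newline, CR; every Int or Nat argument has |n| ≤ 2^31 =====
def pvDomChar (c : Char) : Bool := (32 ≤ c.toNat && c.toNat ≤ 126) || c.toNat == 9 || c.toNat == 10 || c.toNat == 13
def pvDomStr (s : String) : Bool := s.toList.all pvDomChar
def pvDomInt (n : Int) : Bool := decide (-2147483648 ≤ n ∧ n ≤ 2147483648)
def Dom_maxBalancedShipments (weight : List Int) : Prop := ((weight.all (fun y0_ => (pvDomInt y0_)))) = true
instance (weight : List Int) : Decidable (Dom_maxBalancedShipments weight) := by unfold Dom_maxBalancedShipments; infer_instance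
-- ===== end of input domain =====

-- B replaces A's run-list bookkeeping by a one-pass greedy adjacent pairing with O(1) state;
-- both raise IndexError on the empty list, which Pre_ excludes.

-- ===== PORT A =====
def maxBalancedShipments (weight : List Int) : Int :=
  let n : Int := weight.length
  let st := (PySem.List.pyRange 1 n 1).foldl
    (fun (st : List Int × Int) i =>
      let wi := PySem.List.pyGetD weight i 0
      if wi < PySem.List.pyGetD st.1 (-1) 0 then
        (st.1 ++ [wi], st.2)
      else
        ([wi], st.2 + PySem.Int.floordiv st.1.length 2))
    ([PySem.List.pyGetD weight 0 0], 0)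
  st.2 + PySem.Int.floordiv st.1.length 2

-- ===== PORT B =====
-- state = (count, free, prev), exactly Source B's three variables
def maxBalancedShipments_alt (weight : List Int) : Int :=
  let st := (PySem.List.slice weight (some 1) none).foldl
    (fun (st : Int × Bool × Int) w =>
      if st.2.1 && decide (w < st.2.2) then (st.1 + 1, false, w)
      else (st.1, true, w))
    (0, true, PySem.List.pyGetD weight 0 0)
  st.1

-- ===== PRECONDITION & SPEC =====
-- A indexes weight[0] before the loop, so it raises IndexError on the empty list (B does too).
def Pre_maxBalancedShipments (weight : List Int) : Prop := weight ≠ []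
instance (weight : List Int) : Decidable (Pre_maxBalancedShipments weight) := by unfold Pre_maxBalancedShipments; infer_instance
def pvWitness_maxBalancedShipments : List Int := ([5, 3, 1, 4, 2])
def Spec_maxBalancedShipments (weight : List Int) (out : Int) : Prop := out = maxBalancedShipments_alt weight
instance (weight : List Int) (out : Int) : Decidable (Spec_maxBalancedShipments weight out) := by unfold Spec_maxBalancedShipments; infer_instance

-- ===== CLAIM (what is proved, stated in full; the proofs are below) =====
def Claim_equal_maxBalancedShipments : Prop := ∀ (weight : List Int), Dom_maxBalancedShipments weight → Pre_maxBalancedShipments weight → Spec_maxBalancedShipments weight (maxBalancedShipments weight)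

-- ===== LEMMAS AND PROOFS =====

def stepA (st : List Int × Int) (w : Int) : List Int × Int :=
  if w < PySem.List.pyGetD st.1 (-1) 0 then (st.1 ++ [w], st.2)
  else ([w], st.2 + PySem.Int.floordiv st.1.length 2)

def stepB (st : Int × Bool × Int) (w : Int) : Int × Bool × Int :=
  if st.2.1 && decide (w < st.2.2) then (st.1 + 1, false, w)
  else (st.1, true, w)

-- Loop invariant: B's count is A's count plus ⌊|prevs|/2⌋, B's flag is the
-- parity of |prevs|, and B's prev is prevs' last element.
theorem key (l : List Int) (prevs : List Int) (hne : prevs ≠ []) (c : Int) :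
    (l.foldl stepA (prevs, c)).2
      + PySem.Int.floordiv (l.foldl stepA (prevs, c)).1.length 2
    = (l.foldl stepB (c + ((prevs.length / 2 : Nat) : Int),
        (prevs.length % 2 == 1), prevs.getLast hne)).1 := by
  induction l generalizing prevs c with
  | nil => simp
  | cons w t ih =>
    simp only [List.foldl_cons]
    rw [show stepA (prevs, c) w = if w < prevs.getLast hne then (prevs ++ [w], c)
        else ([w], c + PySem.Int.floordiv prevs.length 2) by
      simp [stepA, PySem.List.pyGetD_neg_one _ _ hne]]
    by_cases hw : w < prevs.getLast hne
    · rw [if_pos hw]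
      by_cases hp : prevs.length % 2 = 1
      · rw [show stepB (c + ((prevs.length / 2 : Nat) : Int),
            (prevs.length % 2 == 1), prevs.getLast hne) w
            = (c + ((prevs.length / 2 : Nat) : Int) + 1, false, w) by
          simp [stepB, hp, hw]]
        have h1 := ih (prevs ++ [w]) (by simp) c
        simp only [List.getLast_append_singleton] at h1
        have hlen : (prevs ++ [w]).length / 2 = prevs.length / 2 + 1 := by simp; omega
        have hpar : ((prevs ++ [w]).length % 2 == 1) = false := by simp; omega
        rw [hlen, hpar] at h1
        rw [show c + ((prevs.length / 2 : Nat) : Int) + 1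
            = c + (((prevs.length / 2 + 1 : Nat)) : Int) by push_cast; ring]
        exact h1
      · rw [show stepB (c + ((prevs.length / 2 : Nat) : Int),
            (prevs.length % 2 == 1), prevs.getLast hne) w
            = (c + ((prevs.length / 2 : Nat) : Int), true, w) by
          simp [stepB, hp]]
        have h1 := ih (prevs ++ [w]) (by simp) c
        simp only [List.getLast_append_singleton] at h1
        have hlen : (prevs ++ [w]).length / 2 = prevs.length / 2 := by simp; omega
        have hpar : ((prevs ++ [w]).length % 2 == 1) = true := by simp; omega
        rw [hlen, hpar] at h1
        exact h1
    · rw [if_neg hw]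
      rw [show stepB (c + ((prevs.length / 2 : Nat) : Int),
          (prevs.length % 2 == 1), prevs.getLast hne) w
          = (c + ((prevs.length / 2 : Nat) : Int), true, w) by
        simp [stepB, hw]]
      have h2 := ih [w] (by simp) (c + PySem.Int.floordiv prevs.length 2)
      simp only [List.getLast_singleton, List.length_singleton] at h2
      rw [h2]
      norm_num

-- ===== VERDICT (by name: the statement is the Claim_ definition above) =====
theorem maxBalancedShipments_spec : Claim_equal_maxBalancedShipments := by
  intro weight _ hpre
  unfold Spec_maxBalancedShipments maxBalancedShipments maxBalancedShipments_alt
  obtain ⟨w0, t, rfl⟩ : ∃ w0 t, weight = w0 :: t := by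
    cases weight with
    | nil => exact absurd rfl hpre
    | cons a b => exact ⟨a, b, rfl⟩
  have hbodyA : (fun (st : List Int × Int) (i : Int) =>
      let wi := PySem.List.pyGetD (w0 :: t) i 0
      if wi < PySem.List.pyGetD st.1 (-1) 0 then (st.1 ++ [wi], st.2)
      else ([wi], st.2 + PySem.Int.floordiv (st.1.length : Int) 2))
    = (fun st j => stepA st (PySem.List.pyGetD (w0 :: t) j 0)) := by
    funext st i; simp [stepA]
  rw [hbodyA]
  simp only [PySem.List.foldl_pyRange_pyGetD' (w0 :: t) 0 stepA
      ([PySem.List.pyGetD (w0 :: t) 0 0], 0) (a := 1) (by norm_num),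
    PySem.List.slice_from_one]
  simp only [PySem.List.pyGetD_zero_cons, Int.toNat_one, List.drop_succ_cons,
    List.drop_zero, List.tail_cons]
  have hstepB : (fun (st : Int × Bool × Int) (w : Int) =>
      if st.2.1 && decide (w < st.2.2) then (st.1 + 1, false, w)
      else (st.1, true, w)) = stepB := rfl
  rw [hstepB]
  have := key t [w0] (by simp) 0
  simpa using this
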